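-- pv_equiv track=rewrite | github.com/NayeonS2/TIL | Problem Solving/[ECT]_Implementation_05.py | make_res
-- ===== SOURCE A (Python) =====
-- def make_res(s,i):
--     res = ''
--     find = s[:i]    # 찾을 문자열
--     tmp = s[i:]     # 나머지 문자열
--     cnt = 1         # 자기자신은 먼저 세고 시작
--     while tmp:
--         if find == tmp[:i]: # 바로 뒤에 같은 문자열이있으면
--             cnt += 1        # 카운팅해주고
--             tmp = tmp[i:]   # 문자열에서 제외
--
--         if find != tmp[:i]: # 같은 문자열이 아니면
--             if cnt == 1:    # 숫자랑 문자열을 str으로 붙여줌 (cnt 1일때는 생략)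
--                 res += str(find)
--             elif cnt > 1:
--                 res += str(cnt) + str(find)
--             cnt = 0         # cnt 초기화
--             find = tmp[:i]  # 다음 단위개수 만큼의 문자열을 탐색 시작
--
--     return res
-- ===== SOURCE B (Python) =====
-- def make_res(s, i):
--     parts = []
--     cnt = 1
--     for j in range(i, len(s), i):
--         if s[j:j+i] == s[j-i:j]:
--             cnt += 1
--         else:
--             parts.append(s[j-i:j] if cnt == 1 else str(cnt) + s[j-i:j])
--             cnt = 1
--         if j + i >= len(s):
--             parts.append(s[j:j+i] if cnt == 1 else str(cnt) + s[j:j+i])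
--     return ''.join(parts)
-- ===== Notes on version B (the rewrite author's own statement) =====
-- stated objective: alternative
-- what changed: B run-length encodes in one index-based pass over chunk start positions, comparing each i-chunk with the previous one in place and joining the emitted pieces at the end, instead of A's while loop that repeatedly re-slices the shrinking remainder string and grows the result by concatenation; Pre_ excludes i <= 0 with non-empty s, where A never terminates, and the single input ('', 0), where A returns '' but B's range with step 0 raises ValueError.
-- outside the precondition, e.g. on make_res('', 0): A returns '', B raises ValueError
import Mathlib
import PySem

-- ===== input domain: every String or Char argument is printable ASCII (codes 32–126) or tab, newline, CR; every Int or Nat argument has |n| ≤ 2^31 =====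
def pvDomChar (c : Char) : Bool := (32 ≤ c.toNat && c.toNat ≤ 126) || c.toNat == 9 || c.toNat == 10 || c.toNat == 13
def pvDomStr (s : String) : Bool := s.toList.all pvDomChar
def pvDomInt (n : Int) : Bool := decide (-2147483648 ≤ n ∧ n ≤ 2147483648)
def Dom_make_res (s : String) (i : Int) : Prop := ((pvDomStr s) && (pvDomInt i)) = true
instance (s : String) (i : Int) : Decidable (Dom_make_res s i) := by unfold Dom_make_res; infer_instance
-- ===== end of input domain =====

-- B run-length encodes in one index-based pass comparing each i-chunk with the one before it in place,
-- instead of A's while loop that repeatedly re-slices the shrinking remainder string.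

-- ===== PORT A =====
-- A's while loop; fuel is only a totality guard (2*len+2 steps suffice inside Pre_, see pvLoopA_eq)
def pvLoopA : Nat → List Char → List Char → List Char → Int → Int → List Char
  | 0, res, _, _, _, _ => res
  | fuel + 1, res, find, tmp, cnt, i =>
    if tmp = [] then res
    else
      -- if find == tmp[:i]: cnt += 1; tmp = tmp[i:]
      let cnt1 := if find = PySem.List.slice tmp none (some i) then cnt + 1 else cnt
      let tmp1 := if find = PySem.List.slice tmp none (some i) then PySem.List.slice tmp (some i) none else tmp
      -- if find != tmp[:i]: flush res, cnt = 0, find = tmp[:i]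
      if find ≠ PySem.List.slice tmp1 none (some i) then
        let res1 := if cnt1 = 1 then res ++ find
                    else if cnt1 > 1 then res ++ PySem.Int.toChars cnt1 ++ find
                    else res
        pvLoopA fuel res1 (PySem.List.slice tmp1 none (some i)) tmp1 0 i
      else
        pvLoopA fuel res find tmp1 cnt1 i

def make_res (s : String) (i : Int) : String :=
  let res : List Char := []
  let find := PySem.List.slice s.toList none (some i)
  let tmp := PySem.List.slice s.toList (some i) none
  let cnt : Int := 1
  String.ofList (pvLoopA (2 * s.toList.length + 2) res find tmp cnt i)

-- ===== PORT B =====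
-- the piece appended by Source B's parts.append: c if cnt == 1 else str(cnt) + c
def pvFlushB (cnt : Int) (c : List Char) : List Char :=
  if cnt = 1 then c else PySem.Int.toChars cnt ++ c

-- Source B's for loop over range(i, len(s), i); parts is kept already joined (''.join at the end)
def pvLoopB (s : List Char) (n i : Int) : List Int → List Char → Int → List Char
  | [], parts, _ => parts
  | j :: rest, parts, cnt =>
    let c := PySem.List.slice s (some j) (some (j + i))       -- s[j:j+i]
    let prev := PySem.List.slice s (some (j - i)) (some j)    -- s[j-i:j]
    let cnt1 := if c = prev then cnt + 1 else 1
    let parts1 := if c = prev then parts else parts ++ pvFlushB cnt prev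
    let parts2 := if n ≤ j + i then parts1 ++ pvFlushB cnt1 c else parts1   -- if j + i >= len(s)
    pvLoopB s n i rest parts2 cnt1

def make_res_alt (s : String) (i : Int) : String :=
  String.ofList
    (pvLoopB s.toList (s.toList.length : Int) i
      (PySem.List.pyRange i (s.toList.length : Int) i) [] 1)

-- ===== PRECONDITION & SPEC =====
-- Pre_ excludes only i ≤ 0 with non-empty s, where A's while loop never terminates, and i = 0 with empty s,
-- where B's range(0, 0, 0) raises ValueError (no input A returns on is excluded except ("", 0)).
def Pre_make_res (s : String) (i : Int) : Prop := 1 ≤ i ∨ (s = "" ∧ i ≠ 0)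
instance (s : String) (i : Int) : Decidable (Pre_make_res s i) := by unfold Pre_make_res; infer_instance
def pvWitness_make_res : String × Int := ("aabbb", 1)

def Spec_make_res (s : String) (i : Int) (out : String) : Prop := out = make_res_alt s i
instance (s : String) (i : Int) (out : String) : Decidable (Spec_make_res s i out) := by unfold Spec_make_res; infer_instance

-- ===== CLAIM (what is proved, stated in full; the proofs are below) =====
def Claim_equal_make_res : Prop := ∀ (s : String) (i : Int), Dom_make_res s i → Pre_make_res s i → Spec_make_res s i (make_res s i)

-- ===== LEMMAS AND PROOFS =====

-- the chunk list of a string at chunk size k+1 (proof-only characterisation both loops are related to)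
def pvChunksF : Nat → List Char → Nat → List (List Char)
  | _, [], _ => []
  | 0, _ :: _, _ => []
  | fuel + 1, c :: t, k => (c :: t).take (k + 1) :: pvChunksF fuel (t.drop k) k

def pvChunks (l : List Char) (k : Nat) : List (List Char) := pvChunksF l.length l k

-- length of the run of chunks equal to c at the front of cs
def pvRunlen (c : List Char) : List (List Char) → Nat
  | [] => 0
  | d :: ds => if d = c then pvRunlen c ds + 1 else 0

-- run-length encoding of a chunk list
def pvEncodeF : Nat → List (List Char) → List Char
  | _, [] => []
  | 0, _ :: _ => []
  | fuel + 1, c :: cs =>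
    (if 1 < pvRunlen c cs + 1 then PySem.Int.toChars ((pvRunlen c cs + 1 : Nat) : Int) else [])
      ++ c ++ pvEncodeF fuel (cs.drop (pvRunlen c cs + 1 - 1))

def pvEncode (cs : List (List Char)) : List Char := pvEncodeF cs.length cs

-- what a flush emits for a pending chunk `f` counted `c` times
def pvEncPart (c : Int) (f : List Char) : List Char :=
  if c = 1 then f else if c > 1 then PySem.Int.toChars c ++ f else []

-- what both loops still have to emit: pending chunk `find` seen `cnt` times, remaining chunks `cs`
def pvEncFrom (find : List Char) (cnt : Int) (cs : List (List Char)) : List Char :=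
  pvEncPart (cnt + pvRunlen find cs) find ++ pvEncode (cs.drop (pvRunlen find cs))

lemma pvChunksF_congr : ∀ (f1 f2 : Nat) (l : List Char) (k : Nat),
    l.length ≤ f1 → l.length ≤ f2 → pvChunksF f1 l k = pvChunksF f2 l k := by
  intro f1
  induction f1 with
  | zero =>
    intro f2 l k h1 _
    have : l = [] := by cases l <;> simp_all
    subst this; cases f2 <;> simp [pvChunksF]
  | succ f ih =>
    intro f2 l k h1 h2
    cases l with
    | nil => cases f2 <;> simp [pvChunksF]
    | cons c t =>
      cases f2 with
      | zero => simp at h2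
      | succ g =>
        simp only [pvChunksF, List.cons.injEq, true_and]
        apply ih <;> simp at h1 h2 ⊢ <;> omega

lemma pvChunks_cons (l : List Char) (k : Nat) (hl : l ≠ []) (hk : 1 ≤ k) :
    pvChunks l (k - 1) = l.take k :: pvChunks (l.drop k) (k - 1) := by
  cases l with
  | nil => exact absurd rfl hl
  | cons c t =>
    show pvChunksF (t.length + 1) (c :: t) (k - 1) = _
    simp only [pvChunksF]
    have h1 : k - 1 + 1 = k := by omega
    have h2 : (c :: t).drop k = t.drop (k - 1) := by
      cases k with
      | zero => omega
      | succ m => simp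
    rw [h1, h2]
    refine congrArg _ (pvChunksF_congr _ _ _ _ ?_ ?_) <;> simp

lemma pvEncodeF_congr : ∀ (f1 f2 : Nat) (cs : List (List Char)),
    cs.length ≤ f1 → cs.length ≤ f2 → pvEncodeF f1 cs = pvEncodeF f2 cs := by
  intro f1
  induction f1 with
  | zero =>
    intro f2 cs h1 _
    have : cs = [] := by cases cs <;> simp_all
    subst this; cases f2 <;> simp [pvEncodeF]
  | succ f ih =>
    intro f2 cs h1 h2
    cases cs with
    | nil => cases f2 <;> simp [pvEncodeF]
    | cons c t =>
      cases f2 with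
      | zero => simp at h2
      | succ g =>
        simp only [pvEncodeF, List.append_assoc]
        congr 1
        congr 1
        apply ih <;> simp at h1 h2 ⊢ <;> omega

lemma pvEncode_cons (g : List Char) (cs : List (List Char)) :
    pvEncode (g :: cs) = pvEncPart ((pvRunlen g cs : Int) + 1) g ++ pvEncode (cs.drop (pvRunlen g cs)) := by
  show pvEncodeF (cs.length + 1) (g :: cs) = _
  simp only [pvEncodeF, Nat.add_sub_cancel]
  rw [pvEncodeF_congr cs.length (cs.drop (pvRunlen g cs)).length (cs.drop (pvRunlen g cs))
        (by simp) (le_refl _)]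
  show _ = pvEncPart ((pvRunlen g cs : Int) + 1) g ++ pvEncodeF _ _
  cases h : pvRunlen g cs with
  | zero => simp [pvEncPart]
  | succ m =>
    have h1 : (1 : Nat) < m + 1 + 1 := by omega
    have h2 : ¬ ((m : Int) + 1 + 1 = 1) := by omega
    have h3 : ((m : Int) + 1 + 1 > 1) := by omega
    simp only [if_pos h1, pvEncPart, Nat.cast_add, Nat.cast_one, if_neg h2, if_pos h3,
      List.append_assoc]

lemma pvRunlen_cons_self (g : List Char) (cs : List (List Char)) :
    pvRunlen g (g :: cs) = pvRunlen g cs + 1 := by simp [pvRunlen]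

lemma pvRunlen_cons_ne (g d : List Char) (cs : List (List Char)) (h : d ≠ g) :
    pvRunlen g (d :: cs) = 0 := by simp [pvRunlen, h]

lemma pvEncFrom_zero_cons (g : List Char) (cs : List (List Char)) :
    pvEncFrom g 0 (g :: cs) = pvEncode (g :: cs) := by
  rw [pvEncode_cons]
  simp only [pvEncFrom, pvRunlen_cons_self, List.drop_succ_cons]
  have : (0 : Int) + ((pvRunlen g cs + 1 : Nat) : Int) = (pvRunlen g cs : Int) + 1 := by
    push_cast; ring
  rw [this]

lemma pvEncFrom_one (g : List Char) (cs : List (List Char)) :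
    pvEncFrom g 1 cs = pvEncode (g :: cs) := by
  rw [pvEncode_cons]
  simp only [pvEncFrom]
  have : (1 : Int) + ((pvRunlen g cs : Nat) : Int) = (pvRunlen g cs : Int) + 1 := by ring
  rw [this]

lemma pvEncFrom_cons_self (g : List Char) (cnt : Int) (cs : List (List Char)) :
    pvEncFrom g cnt (g :: cs) = pvEncFrom g (cnt + 1) cs := by
  simp only [pvEncFrom, pvRunlen_cons_self, List.drop_succ_cons]
  have : cnt + ((pvRunlen g cs + 1 : Nat) : Int) = cnt + 1 + ((pvRunlen g cs : Nat) : Int) := by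
    push_cast; ring
  rw [this]

lemma pvEncFrom_break (f d : List Char) (cnt : Int) (cs : List (List Char)) (h : d ≠ f) :
    pvEncFrom f cnt (d :: cs) = pvEncPart cnt f ++ pvEncode (d :: cs) := by
  simp only [pvEncFrom, pvRunlen_cons_ne f d cs h, List.drop_zero, Nat.cast_zero, add_zero]

lemma pvEncFrom_nil (f : List Char) (cnt : Int) :
    pvEncFrom f cnt [] = pvEncPart cnt f := by
  simp [pvEncFrom, pvRunlen, pvEncode, pvEncodeF]

lemma pvFlush_eq (res f : List Char) (c : Int) :
    (if c = 1 then res ++ f else if c > 1 then res ++ PySem.Int.toChars c ++ f else res)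
      = res ++ pvEncPart c f := by
  simp only [pvEncPart]
  split_ifs <;> simp

lemma pvLoopA_nil (fuel : Nat) (res find : List Char) (cnt i : Int) (h : 1 ≤ fuel) :
    pvLoopA fuel res find [] cnt i = res := by
  cases fuel with
  | zero => omega
  | succ f => simp [pvLoopA]

lemma pvLoopA_eq (i : Int) (hi : 1 ≤ i) :
    ∀ (fuel : Nat) (tmp res find : List Char) (cnt : Int),
      tmp ≠ [] →
      (1 ≤ cnt ∨ (cnt = 0 ∧ find = tmp.take i.toNat)) →
      2 * tmp.length + (if find = tmp.take i.toNat then 1 else 2) ≤ fuel →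
      pvLoopA fuel res find tmp cnt i = res ++ pvEncFrom find cnt (pvChunks tmp (i.toNat - 1)) := by
  have hk : 1 ≤ i.toNat := by omega
  have hs1 : ∀ l : List Char, PySem.List.slice l none (some i) = l.take i.toNat :=
    fun l => PySem.List.slice_to l (by omega)
  have hs2 : ∀ l : List Char, PySem.List.slice l (some i) none = l.drop i.toNat :=
    fun l => PySem.List.slice_from l (by omega)
  intro fuel
  induction fuel with
  | zero =>
    intro tmp res find cnt htmp hcnt hfuel
    exfalso
    have : 1 ≤ (if find = tmp.take i.toNat then 1 else 2) := by split <;> omega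
    omega
  | succ f ih =>
    intro tmp res find cnt htmp hcnt hfuel
    have htlen : 0 < tmp.length := List.length_pos_iff.mpr htmp
    have hfind_ne : tmp.take i.toNat ≠ [] := by
      intro h
      rcases List.take_eq_nil_iff.mp h with h' | h'
      all_goals first | exact htmp h' | omega
    have hchunks := pvChunks_cons tmp i.toNat htmp hk
    have hlen1 : (tmp.drop i.toNat).length = tmp.length - i.toNat := by simp
    simp only [pvLoopA, if_neg htmp, hs1, hs2]
    by_cases h1 : find = tmp.take i.toNat
    · -- first if fires: cnt += 1, tmp becomes tmp[i:]
      rw [if_pos h1] at hfuel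
      simp only [if_pos h1]
      by_cases h2 : tmp.drop i.toNat = []
      · -- remainder empty: flush in this iteration, next check ends the loop
        rw [h2]
        have hcond : find ≠ ([] : List Char).take i.toNat := by
          simpa using h1 ▸ hfind_ne
        rw [if_pos hcond]
        rw [pvLoopA_nil f _ _ _ _ (by omega)]
        rw [hchunks, h2]
        have hch : pvChunks ([] : List Char) (i.toNat - 1) = [] := rfl
        rw [hch, ← h1, pvEncFrom_cons_self, pvEncFrom_nil, pvFlush_eq]
      · -- remainder non-empty
        have hchunks2 := pvChunks_cons (tmp.drop i.toNat) i.toNat h2 hk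
        have hd2 : 0 < (tmp.drop i.toNat).length := List.length_pos_iff.mpr h2
        have hfuel2 : ∀ b : Nat, b ≤ 2 →
            2 * (tmp.drop i.toNat).length + b ≤ f := by intro b hb; omega
        by_cases h3 : find = (tmp.drop i.toNat).take i.toNat
        · -- run continues: no flush
          rw [if_neg (not_not_intro h3)]
          rw [ih (tmp.drop i.toNat) res find (cnt + 1) h2 (Or.inl (by omega))
              (hfuel2 _ (by split <;> omega))]
          rw [hchunks, ← h1, pvEncFrom_cons_self]
        · -- run breaks: flush here, restart with cnt = 0
          rw [if_pos h3]
          rw [ih (tmp.drop i.toNat) _ ((tmp.drop i.toNat).take i.toNat) 0 h2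
              (Or.inr ⟨rfl, rfl⟩) (by rw [if_pos rfl]; exact hfuel2 1 (by omega))]
          rw [hchunks2, pvEncFrom_zero_cons, ← hchunks2]
          rw [hchunks, ← h1, pvEncFrom_cons_self]
          rw [hchunks2, pvEncFrom_break find _ (cnt + 1) _
              (fun h => h3 h.symm), ← hchunks2, pvFlush_eq, List.append_assoc]
    · -- first if does not fire; second fires: flush, restart with cnt = 0
      have hcnt1 : 1 ≤ cnt := by
        rcases hcnt with h | ⟨_, h⟩
        · exact h
        · exact absurd h h1
      rw [if_neg h1] at hfuel
      rw [if_neg h1, if_pos h1]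
      rw [ih tmp _ (tmp.take i.toNat) 0 htmp (Or.inr ⟨rfl, rfl⟩)
          (by rw [if_pos rfl]; omega)]
      rw [hchunks, pvEncFrom_zero_cons, ← hchunks]
      rw [hchunks, pvEncFrom_break find _ cnt _ (fun h => h1 h.symm), ← hchunks,
          pvFlush_eq, List.append_assoc]
      rw [if_neg h1]

lemma pvSlice_nil (a b : Option Int) : PySem.List.slice ([] : List Char) a b = [] := by
  cases a <;> cases b <;> simp [PySem.List.slice]

-- pyRange structure for a positive step
lemma pvRange_nil (a b i : Int) (hi : 0 < i) (h : b ≤ a) : PySem.List.pyRange a b i = [] := by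
  rw [PySem.List.pyRange_of_pos _ _ hi, if_neg (by omega : ¬ a < b)]
  simp

lemma pvRange_cons (a b i : Int) (hi : 0 < i) (h : a < b) :
    PySem.List.pyRange a b i = a :: PySem.List.pyRange (a + i) b i := by
  rw [PySem.List.pyRange_of_pos _ _ hi, PySem.List.pyRange_of_pos _ _ hi]
  have h1 : b - a + i - 1 = (b - a - 1) + 1 * i := by ring
  have h2 : (b - a + i - 1) / i = (b - a - 1) / i + 1 := by
    rw [h1, Int.add_mul_ediv_right _ _ (by omega : i ≠ 0)]
  have h3 : 0 ≤ (b - a - 1) / i := Int.ediv_nonneg (by omega) (by omega)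
  rw [if_pos h, h2]
  have h4 : ((b - a - 1) / i + 1).toNat = ((b - a - 1) / i).toNat + 1 := by omega
  rw [h4, List.range_succ_eq_map, List.map_cons, List.map_map]
  have h5 : (fun k : Nat => a + i * (k : Int)) ∘ Nat.succ = fun k : Nat => (a + i) + i * (k : Int) := by
    funext k
    simp [Nat.succ_eq_add_one]
    ring
  by_cases hb : a + i < b
  · rw [if_pos hb]
    have h6 : b - (a + i) + i - 1 = b - a - 1 := by ring
    rw [h6, h5]
    simp
  · rw [if_neg hb]
    have h7 : (b - a - 1) / i = 0 :=
      Int.ediv_eq_zero_of_lt (by omega) (by omega)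
    rw [h7]
    simp

lemma pvFlushB_eq (cnt : Int) (c : List Char) (h : 1 ≤ cnt) :
    pvFlushB cnt c = pvEncPart cnt c := by
  simp only [pvFlushB, pvEncPart]
  split_ifs with h1 h2
  · rfl
  · rfl
  · omega

-- B's loop, related to the same pvEncFrom characterisation as A's
lemma pvLoopB_eq (s : List Char) (i : Int) (hi : 1 ≤ i) :
    ∀ (fuel : Nat) (j : Int) (parts : List Char) (cnt : Int),
      i ≤ j → j < (s.length : Int) → ((s.length : Int) - j).toNat ≤ fuel → 1 ≤ cnt →
      pvLoopB s (s.length : Int) i (PySem.List.pyRange j (s.length : Int) i) parts cnt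
        = parts ++ pvEncFrom ((s.drop (j - i).toNat).take i.toNat) cnt
            (pvChunks (s.drop j.toNat) (i.toNat - 1)) := by
  intro fuel
  induction fuel with
  | zero =>
    intro j parts cnt hij hjn hfuel hcnt
    exfalso; omega
  | succ f ih =>
    intro j parts cnt hij hjn hfuel hcnt
    have hj0 : 0 ≤ j := by omega
    have hjlen : j.toNat < s.length := by omega
    have htmp : s.drop j.toNat ≠ [] := by
      intro h
      have := List.drop_eq_nil_iff.mp h
      omega
    have hc : PySem.List.slice s (some j) (some (j + i))
        = (s.drop j.toNat).take i.toNat := by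
      rw [PySem.List.slice_toNat s hj0 (by omega)]
      have : (j + i).toNat - j.toNat = i.toNat := by omega
      rw [this]
    have hprev : PySem.List.slice s (some (j - i)) (some j)
        = (s.drop (j - i).toNat).take i.toNat := by
      rw [PySem.List.slice_toNat s (by omega) hj0]
      have : j.toNat - (j - i).toNat = i.toNat := by omega
      rw [this]
    have hchunks := pvChunks_cons (s.drop j.toNat) i.toNat htmp (by omega)
    have hdd : (s.drop j.toNat).drop i.toNat = s.drop (j + i).toNat := by
      rw [List.drop_drop]
      congr 1
      omega
    rw [pvRange_cons j _ i (by omega) hjn]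
    simp only [pvLoopB, hc, hprev]
    set c := (s.drop j.toNat).take i.toNat with hcdef
    set prev := (s.drop (j - i).toNat).take i.toNat with hprevdef
    rw [hchunks, hdd]
    by_cases heq : c = prev
    · simp only [if_pos heq]
      rw [heq, pvEncFrom_cons_self]
      by_cases hend : (s.length : Int) ≤ j + i
      · rw [if_pos hend]
        have hrest : PySem.List.pyRange (j + i) (s.length : Int) i = [] :=
          pvRange_nil _ _ _ (by omega) hend
        rw [hrest]
        have hd2 : s.drop (j + i).toNat = [] := by
          rw [List.drop_eq_nil_iff]; omega
        rw [hd2]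
        simp only [pvLoopB]
        have hch : pvChunks ([] : List Char) (i.toNat - 1) = [] := rfl
        rw [hch, pvEncFrom_nil, pvFlushB_eq _ _ (by omega : (1:Int) ≤ cnt + 1)]
      · rw [if_neg hend]
        rw [ih (j + i) parts (cnt + 1) (by omega) (by omega) (by omega) (by omega)]
        have : (j + i - i).toNat = j.toNat := by omega
        rw [this, ← hcdef, heq]
    · simp only [if_neg heq]
      rw [pvEncFrom_break prev c cnt _ heq]
      by_cases hend : (s.length : Int) ≤ j + i
      · rw [if_pos hend]
        have hrest : PySem.List.pyRange (j + i) (s.length : Int) i = [] :=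
          pvRange_nil _ _ _ (by omega) hend
        rw [hrest]
        have hd2 : s.drop (j + i).toNat = [] := by
          rw [List.drop_eq_nil_iff]; omega
        rw [hd2]
        simp only [pvLoopB]
        have hch : pvChunks ([] : List Char) (i.toNat - 1) = [] := rfl
        rw [hch]
        have henc : pvEncode [c] = c := by
          show pvEncodeF 1 [c] = c
          simp [pvEncodeF, pvRunlen]
        rw [henc, pvFlushB_eq _ _ hcnt]
        simp [pvFlushB]
      · rw [if_neg hend]
        rw [ih (j + i) _ 1 (by omega) (by omega) (by omega) (by omega)]
        have : (j + i - i).toNat = j.toNat := by omega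
        rw [this, ← hcdef]
        have hd2 : s.drop (j + i).toNat ≠ [] := by
          intro h
          have := List.drop_eq_nil_iff.mp h
          omega
        rw [pvEncFrom_one, pvFlushB_eq _ _ hcnt]
        simp

-- ===== VERDICT (by name: the statement is the Claim_ definition above) =====
theorem make_res_spec : Claim_equal_make_res := by
  unfold Claim_equal_make_res
  intro s i _ hpre
  unfold Spec_make_res
  by_cases hs : s.toList = []
  · simp only [make_res, make_res_alt]
    rw [hs, pvSlice_nil, pvSlice_nil, pvLoopA_nil _ _ _ _ _ (by norm_num)]
    simp only [List.length_nil, Nat.cast_zero]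
    rcases hpre with hi | ⟨_, hi⟩
    · rw [pvRange_nil _ _ _ (by omega) (by omega)]
      rfl
    · rcases lt_or_gt_of_ne hi with hneg | hpos
      · have hr : PySem.List.pyRange i 0 i = [] := by
          simp only [PySem.List.pyRange]
          rw [if_neg hi, if_neg (by omega : ¬ (0:Int) < i), if_neg (by omega : ¬ (0:Int) < i)]
          simp
        rw [hr]; rfl
      · rw [pvRange_nil _ _ _ (by omega) (by omega)]; rfl
  · have hne : s ≠ "" := fun h => hs (String.toList_eq_nil_iff.mpr h)
    have hi : 1 ≤ i := hpre.resolve_right (fun h => hne h.1)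
    have hk : 1 ≤ i.toNat := by omega
    have hlenpos : 0 < s.toList.length := List.length_pos_iff.mpr hs
    by_cases hbig : (s.toList.length : Int) ≤ i
    · -- the whole string is a single chunk: both programs return ''
      have hdrop : s.toList.drop i.toNat = [] := by rw [List.drop_eq_nil_iff]; omega
      simp only [make_res, make_res_alt]
      rw [PySem.List.slice_from s.toList (by omega), hdrop, pvLoopA_nil _ _ _ _ _ (by omega)]
      rw [pvRange_nil _ _ _ (by omega) hbig]
      rfl
    · -- at least two chunks: both loops compute pvEncFrom over the chunk list
      have hjn : i < (s.toList.length : Int) := by omega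
      have hdropA : s.toList.drop i.toNat ≠ [] := by
        intro h
        have := List.drop_eq_nil_iff.mp h
        omega
      simp only [make_res, make_res_alt]
      rw [PySem.List.slice_to s.toList (by omega), PySem.List.slice_from s.toList (by omega)]
      rw [pvLoopA_eq i hi _ _ _ _ _ hdropA (Or.inl le_rfl)
          (by have : (s.toList.drop i.toNat).length = s.toList.length - i.toNat := by simp
              split <;> omega)]
      rw [pvLoopB_eq s.toList i hi _ i [] 1 le_rfl hjn le_rfl le_rfl]
      have h0 : (i - i).toNat = 0 := by omega
      rw [h0, List.drop_zero]
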